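-- pv_equiv track=rewrite | github.com/ReiHakiri/Learning-computation | CLTM/actions.py | add_move
-- ===== SOURCE A (Python) =====
-- from itertools import product
--
-- def multi_to_state(line_n: int, intermediate: int, v_values: list[int], total_lines: int, v_bounds: list[int]) -> int:
--     result = line_n
--     radix = total_lines
--
--     result += intermediate * radix
--     radix *= 3
--
--     for v_value, v_bound in zip(v_values, v_bounds):
--         if v_value >= v_bound:
--             raise Exception('Variable value out of bounds')
--
--         result += v_value * radix
--         radix *= v_bound
--
--     return result
--
-- def all_v_values(v_bounds: list[int]) -> product:
--     result = []
--
--     for v_bound in v_bounds: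
--         result.append(range(v_bound))
--
--     return product(*result)
--
-- HALT = -1
--
-- def add_move(transition_table: list[list[int]], line_n: int, total_symbols: int, total_lines: int, v_bounds: list[int], d: int) -> list[list[tuple[int, int, int]]]:
--     for v_values in all_v_values(v_bounds):
--         state1 = multi_to_state(line_n, 0, v_values, total_lines, v_bounds)
--
--         if line_n + 1 >= total_lines:
--             state2 = HALT
--
--         else:
--             state2 = multi_to_state(line_n + 1, 0, v_values, total_lines, v_bounds)
--
--         for symbol in range(total_symbols):
--             transition_table[symbol][state1] = (symbol, state2, d)
--
--     return transition_table
-- ===== SOURCE B (Python) =====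
-- def add_move(transition_table, line_n, total_symbols, total_lines, v_bounds, d):
--     n = 1
--     for v_bound in v_bounds:
--         n *= max(v_bound, 0)
--     base = 3 * total_lines
--     halt = line_n + 1 >= total_lines
--     for m in range(n):
--         state1 = line_n + base * m
--         state2 = -1 if halt else state1 + 1
--         for symbol in range(total_symbols):
--             transition_table[symbol][state1] = (symbol, state2, d)
--     return transition_table
-- ===== Notes on version B (the rewrite author's own statement) =====
-- stated objective: simpler
-- what changed: B drops the itertools.product enumeration and the multi_to_state radix helper: one flat index m over range(prod(v_bounds)) gives state1 = line_n + 3*total_lines*m directly and state2 = state1+1 unless the HALT guard fires.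
import Mathlib
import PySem

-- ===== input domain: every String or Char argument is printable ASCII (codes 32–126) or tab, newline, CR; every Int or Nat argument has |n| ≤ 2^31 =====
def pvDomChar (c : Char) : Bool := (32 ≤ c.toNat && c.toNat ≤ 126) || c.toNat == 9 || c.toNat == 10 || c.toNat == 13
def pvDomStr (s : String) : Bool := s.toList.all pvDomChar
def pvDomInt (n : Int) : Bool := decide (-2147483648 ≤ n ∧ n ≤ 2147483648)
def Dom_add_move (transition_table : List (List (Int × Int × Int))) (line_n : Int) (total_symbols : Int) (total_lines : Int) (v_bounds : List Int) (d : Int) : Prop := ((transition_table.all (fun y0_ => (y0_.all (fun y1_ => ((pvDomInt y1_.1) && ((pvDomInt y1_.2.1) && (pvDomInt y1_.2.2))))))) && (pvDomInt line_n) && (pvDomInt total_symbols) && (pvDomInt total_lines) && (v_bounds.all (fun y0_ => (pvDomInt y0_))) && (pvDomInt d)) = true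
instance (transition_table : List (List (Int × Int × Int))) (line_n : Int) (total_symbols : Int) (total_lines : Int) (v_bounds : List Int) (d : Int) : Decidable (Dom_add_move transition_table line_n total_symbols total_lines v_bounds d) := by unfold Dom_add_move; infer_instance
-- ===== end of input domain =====

-- B replaces the itertools.product enumeration and the per-tuple multi_to_state radix helper by a single
-- flat index m over range(prod(v_bounds)) with state1 = line_n + 3*total_lines*m (objective: simpler).
-- A mutates transition_table in place; so does B — the equivalence proved here is about the return value.

-- ===== PORT A =====
-- `transition_table[symbol][state1] = v` — row fetch + item assignment, Python index semantics
-- (negative wraparound; out-of-range = IndexError, excluded by Pre_, on which pySetD/pyGetD are exact).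
def pvWriteCell (t : List (List (Int × Int × Int))) (s i : Int) (v : Int × Int × Int) :
    List (List (Int × Int × Int)) :=
  PySem.List.pySetD t s (PySem.List.pySetD (PySem.List.pyGetD t s []) i v)

def multi_to_state (line_n : Int) (intermediate : Int) (v_values : List Int) (total_lines : Int)
    (v_bounds : List Int) : Option Int :=
  ((v_values.zip v_bounds).foldl
    (fun acc p =>
      match acc with
      | none => none   -- an earlier iteration raised 'Variable value out of bounds'
      | some rr => if p.1 ≥ p.2 then none else some (rr.1 + p.1 * rr.2, rr.2 * p.2))
    (some (line_n + intermediate * total_lines, total_lines * 3))).map (·.1)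

def pvProd : List (List Int) → List (List Int)
  | [] => [[]]
  | r :: rest => r.flatMap (fun x => (pvProd rest).map (fun vs => x :: vs))

def all_v_values (v_bounds : List Int) : List (List Int) :=
  pvProd (v_bounds.map (fun b => PySem.List.pyRange 0 b 1))

def add_move (transition_table : List (List (Int × Int × Int))) (line_n : Int) (total_symbols : Int) (total_lines : Int) (v_bounds : List Int) (d : Int) : List (List (Int × Int × Int)) :=
  (all_v_values v_bounds).foldl
    (fun table v_values =>
      match multi_to_state line_n 0 v_values total_lines v_bounds with
      | none => table   -- unreachable: members of all_v_values never trip the bounds check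
      | some state1 =>
        let state2 : Int :=
          if line_n + 1 ≥ total_lines then -1  -- HALT
          else (multi_to_state (line_n + 1) 0 v_values total_lines v_bounds).getD 0
        (PySem.List.pyRange 0 total_symbols 1).foldl
          (fun t symbol => pvWriteCell t symbol state1 (symbol, state2, d)) table)
    transition_table

-- ===== PORT B =====
-- n = prod(max(b,0) for b in v_bounds), the number of variable-value combinations
def pvN (v_bounds : List Int) : Int := v_bounds.foldl (fun acc b => acc * max b 0) 1

def add_move_alt (transition_table : List (List (Int × Int × Int))) (line_n : Int) (total_symbols : Int) (total_lines : Int) (v_bounds : List Int) (d : Int) : List (List (Int × Int × Int)) :=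
  let base := 3 * total_lines
  let halt := line_n + 1 ≥ total_lines
  (PySem.List.pyRange 0 (pvN v_bounds) 1).foldl
    (fun table m =>
      let state1 := line_n + base * m
      let state2 : Int := if halt then -1 else state1 + 1
      (PySem.List.pyRange 0 total_symbols 1).foldl
        (fun t symbol => pvWriteCell t symbol state1 (symbol, state2, d)) table)
    transition_table

-- ===== PRECONDITION & SPEC =====
-- validity of one row of length L: every written index line_n + 3*total_lines*m (0 ≤ m < n) is a
-- valid Python index (the endpoints of the arithmetic progression suffice), and — unless every write
-- carries the HALT value — no two distinct indices resolve to the same physical cell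
def pvRowOk (line_n total_lines n : Int) (L : Nat) : Prop :=
  (-(L : Int) ≤ line_n ∧ line_n < (L : Int)) ∧
  (-(L : Int) ≤ line_n + 3 * total_lines * (n - 1) ∧
    line_n + 3 * total_lines * (n - 1) < (L : Int)) ∧
  (line_n + 1 < total_lines →
    ¬ ((3 * total_lines) ∣ (L : Int) ∧
       -(n - 1) ≤ (L : Int) / (3 * total_lines) ∧ (L : Int) / (3 * total_lines) ≤ n - 1 ∧
       min line_n (line_n + 3 * total_lines * (n - 1)) < 0))

-- Pre_ excludes (a) the inputs on which A raises IndexError (some written cell out of range), and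
-- (b) inputs where two different enumeration indices write DIFFERENT values to the same physical cell
-- (one via negative-index wraparound): there the surviving value depends on itertools.product's
-- accidental enumeration order, and A's and B's results are both defensible.
def Pre_add_move (transition_table : List (List (Int × Int × Int))) (line_n : Int) (total_symbols : Int) (total_lines : Int) (v_bounds : List Int) (d : Int) : Prop :=
  pvN v_bounds ≤ 0 ∨ total_symbols ≤ 0 ∨
  (total_symbols ≤ (transition_table.length : Int) ∧
   ∀ p ∈ PySem.List.enumerate transition_table,
     p.1 < total_symbols → pvRowOk line_n total_lines (pvN v_bounds) p.2.length)

instance (transition_table : List (List (Int × Int × Int))) (line_n : Int) (total_symbols : Int) (total_lines : Int) (v_bounds : List Int) (d : Int) : Decidable (Pre_add_move transition_table line_n total_symbols total_lines v_bounds d) := by unfold Pre_add_move pvRowOk; infer_instance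

def pvWitness_add_move : (List (List (Int × Int × Int))) × Int × Int × Int × List Int × Int :=
  ([[(0, 0, 0)]], 0, 1, 1, [], 0)

def Spec_add_move (transition_table : List (List (Int × Int × Int))) (line_n : Int) (total_symbols : Int) (total_lines : Int) (v_bounds : List Int) (d : Int) (out : List (List (Int × Int × Int))) : Prop := out = add_move_alt transition_table line_n total_symbols total_lines v_bounds d
instance (transition_table : List (List (Int × Int × Int))) (line_n : Int) (total_symbols : Int) (total_lines : Int) (v_bounds : List Int) (d : Int) (out : List (List (Int × Int × Int))) : Decidable (Spec_add_move transition_table line_n total_symbols total_lines v_bounds d out) := by unfold Spec_add_move; infer_instance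

-- ===== CLAIM (what is proved, stated in full; the proofs are below) =====
def Claim_equal_add_move : Prop := ∀ (transition_table : List (List (Int × Int × Int))) (line_n : Int) (total_symbols : Int) (total_lines : Int) (v_bounds : List Int) (d : Int), Dom_add_move transition_table line_n total_symbols total_lines v_bounds d → Pre_add_move transition_table line_n total_symbols total_lines v_bounds d → Spec_add_move transition_table line_n total_symbols total_lines v_bounds d (add_move transition_table line_n total_symbols total_lines v_bounds d)

-- ===== LEMMAS AND PROOFS =====

-- Python's resolution of index i into a list of length L (valid range -L ≤ i < L)
def pvResolve (i : Int) (L : Nat) : Int := if i < 0 then i + L else i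


-- little-endian mixed-radix value of a list of (digit, bound) pairs
def pvEncP : List (Int × Int) → Int
  | [] => 0
  | p :: ps => p.1 + p.2 * pvEncP ps

-- running product of the bounds of the pairs
def pvProdP : List (Int × Int) → Int
  | [] => 1
  | p :: ps => p.2 * pvProdP ps

-- recursive form of pvN
def pvNN : List Int → Int
  | [] => 1
  | b :: bs => max b 0 * pvNN bs

-- the inner symbol loop shared by both ports
def pvInner (total_symbols s1 s2 d : Int) (t : List (List (Int × Int × Int))) :
    List (List (Int × Int × Int)) :=
  (PySem.List.pyRange 0 total_symbols 1).foldl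
    (fun t symbol => pvWriteCell t symbol s1 (symbol, s2, d)) t

-- one enumeration step, parameterised by the flat index m
def pvStep (line_n total_symbols total_lines d : Int) (table : List (List (Int × Int × Int)))
    (m : Int) : List (List (Int × Int × Int)) :=
  pvInner total_symbols (line_n + 3 * total_lines * m)
    (if line_n + 1 ≥ total_lines then -1 else line_n + 3 * total_lines * m + 1) d table

theorem pvN_foldl (bs : List Int) : ∀ c : Int, bs.foldl (fun acc b => acc * max b 0) c = c * pvNN bs := by
  induction bs with
  | nil => intro c; simp [pvNN]
  | cons b bs ih => intro c; simp only [List.foldl_cons, pvNN, ih]; ring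

theorem pvN_eq (bs : List Int) : pvN bs = pvNN bs := by
  simpa using pvN_foldl bs 1

theorem pvMts_fold (ps : List (Int × Int)) : ∀ r rad : Int, (∀ p ∈ ps, p.1 < p.2) →
    ps.foldl
      (fun acc p =>
        match acc with
        | none => none
        | some rr => if p.1 ≥ p.2 then none else some (rr.1 + p.1 * rr.2, rr.2 * p.2))
      (some (r, rad)) = some (r + rad * pvEncP ps, rad * pvProdP ps) := by
  induction ps with
  | nil => intro r rad _; simp [pvEncP, pvProdP]
  | cons p ps ih =>
    intro r rad h
    have hp : ¬ p.1 ≥ p.2 := not_le.mpr (h p (by simp))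
    simp only [List.foldl_cons, hp, if_false, ih _ _ (fun q hq => h q (List.mem_cons_of_mem _ hq)),
      pvEncP, pvProdP, Option.some.injEq, Prod.mk.injEq]
    exact ⟨by ring, by ring⟩

theorem pvMem_prod_bounds (bs : List Int) : ∀ vs : List Int,
    vs ∈ pvProd (bs.map (fun b => PySem.List.pyRange 0 b 1)) →
    vs.length = bs.length ∧ ∀ p ∈ vs.zip bs, 0 ≤ p.1 ∧ p.1 < p.2 := by
  induction bs with
  | nil => intro vs h; simp only [List.map_nil, pvProd, List.mem_singleton] at h; subst h; simp
  | cons b bs ih =>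
    intro vs h
    simp only [List.map_cons, pvProd, List.mem_flatMap, List.mem_map] at h
    obtain ⟨x, hx, vs', hvs', rfl⟩ := h
    have hx' := (PySem.List.mem_pyRange_one).1 hx
    obtain ⟨hlen, hall⟩ := ih vs' hvs'
    refine ⟨by simp [hlen], ?_⟩
    intro p hp
    simp only [List.zip_cons_cons, List.mem_cons] at hp
    rcases hp with rfl | hp
    · exact ⟨hx'.1, hx'.2⟩
    · exact hall p hp

theorem pvMts_of_mem (bs : List Int) (vs : List Int) (tl : Int)
    (h : vs ∈ all_v_values bs) (l0 : Int) :
    multi_to_state l0 0 vs tl bs = some (l0 + 3 * tl * pvEncP (vs.zip bs)) := by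
  obtain ⟨-, hall⟩ := pvMem_prod_bounds bs vs h
  unfold multi_to_state
  rw [pvMts_fold (vs.zip bs) (l0 + 0 * tl) (tl * 3) (fun p hp => (hall p hp).2)]
  simp only [Option.map_some, Option.some.injEq]
  ring

-- A's fold, rewritten as pvStep over the list of mixed-radix values
theorem pvA_eq (t : List (List (Int × Int × Int))) (ln ts tl : Int) (bs : List Int) (d : Int) :
    add_move t ln ts tl bs d =
      ((all_v_values bs).map (fun vs => pvEncP (vs.zip bs))).foldl (pvStep ln ts tl d) t := by
  rw [List.foldl_map]
  unfold add_move
  apply PySem.List.foldl_congr_mem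
  intro tb vs hvs
  rw [pvMts_of_mem bs vs tl hvs ln, pvMts_of_mem bs vs tl hvs (ln + 1)]
  unfold pvStep
  simp only [Option.getD_some]
  congr 1
  split_ifs <;> ring_nf

theorem pvB_eq (t : List (List (Int × Int × Int))) (ln ts tl : Int) (bs : List Int) (d : Int) :
    add_move_alt t ln ts tl bs d =
      (PySem.List.pyRange 0 (pvN bs) 1).foldl (pvStep ln ts tl d) t := rfl

-- ===== the permutation: mixed-radix values of the product enumeration ~ range(N) =====
theorem pvPerm_enc (bs : List Int) :
    ((pvProd (bs.map (fun b => PySem.List.pyRange 0 b 1))).map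
        (fun vs => pvEncP (vs.zip bs))).Perm (PySem.List.pyRange 0 (pvNN bs) 1) := by
  induction bs with
  | nil => simp [pvProd, pvNN, pvEncP, PySem.List.pyRange_one]
  | cons b bs ih =>
    have hstep :
        ((pvProd ((b :: bs).map (fun b => PySem.List.pyRange 0 b 1))).map
            (fun vs => pvEncP (vs.zip (b :: bs)))) =
          (PySem.List.pyRange 0 b 1).flatMap (fun x =>
            ((pvProd (bs.map (fun b => PySem.List.pyRange 0 b 1))).map
                (fun vs => pvEncP (vs.zip bs))).map (fun e => x + b * e)) := by
      rw [show (b :: bs).map (fun b => PySem.List.pyRange 0 b 1)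
            = PySem.List.pyRange 0 b 1 :: bs.map (fun b => PySem.List.pyRange 0 b 1) from rfl]
      rw [pvProd, List.map_flatMap]
      apply List.flatMap_congr
      intro x _
      rw [List.map_map, List.map_map]
      apply List.map_congr_left
      intro vs _
      simp [pvEncP]
    rw [hstep]
    refine (List.Perm.flatMap_left _ (fun x _ => ih.map _)).trans ?_
    have hkey : ∀ x e : Int, 0 ≤ x → x < b → (x + b * e) % b = x := by
      intro x e h0 h1
      rw [Int.add_mul_emod_self_left, Int.emod_eq_of_lt h0 h1]
    have hnd1 : ((PySem.List.pyRange 0 b 1).flatMap (fun x =>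
        (PySem.List.pyRange 0 (pvNN bs) 1).map (fun e => x + b * e))).Nodup := by
      rw [List.nodup_flatMap]
      constructor
      · intro x hx
        have hx' := (PySem.List.mem_pyRange_one).1 hx
        exact (PySem.List.nodup_pyRange_one 0 (pvNN bs)).map
          (fun e1 e2 h => by
            have hb : (0 : Int) < b := lt_of_le_of_lt hx'.1 hx'.2
            exact mul_left_cancel₀ (ne_of_gt hb) (by omega))
      · refine (PySem.List.pairwise_lt_pyRange_one 0 b).imp_of_mem ?_
        intro x y hxmem hymem hxy z hz1 hz2
        have hx' := (PySem.List.mem_pyRange_one).1 hxmem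
        have hy' := (PySem.List.mem_pyRange_one).1 hymem
        obtain ⟨e, -, rfl⟩ := List.mem_map.1 hz1
        obtain ⟨e', -, heq⟩ := List.mem_map.1 hz2
        have h1 := hkey x e hx'.1 hx'.2
        have h2 := hkey y e' hy'.1 hy'.2
        rw [heq] at h2
        omega
    refine (List.perm_ext_iff_of_nodup hnd1 (PySem.List.nodup_pyRange_one _ _)).mpr ?_
    intro z
    simp only [List.mem_flatMap, List.mem_map, PySem.List.mem_pyRange_one, pvNN]
    constructor
    · rintro ⟨x, ⟨hx0, hxb⟩, ⟨e, ⟨he0, heN⟩, rfl⟩⟩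
      have hb : (0 : Int) < b := lt_of_le_of_lt hx0 hxb
      have hmax : max b 0 = b := max_eq_left hb.le
      have hmul : b * (e + 1) ≤ b * pvNN bs := mul_le_mul_of_nonneg_left (by omega) hb.le
      constructor
      · exact add_nonneg hx0 (mul_nonneg hb.le he0)
      · rw [hmax]; nlinarith
    · rintro ⟨hz0, hzN⟩
      have hb : (0 : Int) < b := by
        by_contra hb
        rw [max_eq_right (by omega), zero_mul] at hzN
        omega
      rw [max_eq_left hb.le] at hzN
      refine ⟨z % b, ⟨Int.emod_nonneg z (ne_of_gt hb), Int.emod_lt_of_pos z hb⟩,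
        z / b, ⟨Int.ediv_nonneg hz0 hb.le, ?_⟩, ?_⟩
      · rw [Int.ediv_lt_iff_lt_mul hb, mul_comm]
        exact hzN
      · exact Int.emod_add_mul_ediv z b

-- fold over a permutation with an invariant and invariant-restricted commutativity
theorem pvFoldlPermInv {α β : Type} (P : β → Prop) (f : β → α → β) {l₁ l₂ : List α}
    (hperm : l₁.Perm l₂) :
    (∀ b x, P b → x ∈ l₁ → P (f b x)) →
    (∀ b x y, P b → x ∈ l₁ → y ∈ l₁ → f (f b x) y = f (f b y) x) →
    ∀ init, P init → l₁.foldl f init = l₂.foldl f init := by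
  induction hperm with
  | nil => intro _ _ _ _; rfl
  | @cons x l₁' l₂' h ih =>
    intro hP hcomm init hinit
    simp only [List.foldl_cons]
    exact ih (fun b y hb hy => hP b y hb (List.mem_cons_of_mem _ hy))
      (fun b y z hb hy hz =>
        hcomm b y z hb (List.mem_cons_of_mem _ hy) (List.mem_cons_of_mem _ hz))
      _ (hP _ _ hinit (by simp))
  | @swap x y l =>
    intro hP hcomm init hinit
    simp only [List.foldl_cons]
    rw [hcomm init y x hinit (by simp) (by simp)]
  | @trans l₁' l₂' l₃' h12 h23 ih1 ih2 =>
    intro hP hcomm init hinit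
    rw [ih1 hP hcomm init hinit,
      ih2 (fun b y hb hy => hP b y hb (h12.mem_iff.mpr hy))
        (fun b y z hb hy hz => hcomm b y z hb (h12.mem_iff.mpr hy) (h12.mem_iff.mpr hz))
        init hinit]

-- ===== shape and cell-level facts =====
theorem pvWriteCell_shape (t : List (List (Int × Int × Int))) (s i : Int) (v : Int × Int × Int) :
    (pvWriteCell t s i v).map List.length = t.map List.length := by
  unfold pvWriteCell
  rcases hj : PySem.List.pyIdx? t.length s with - | j
  · simp [PySem.List.pySetD, PySem.List.pySet?, hj]
  · have hjlt : j < t.length := by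
      unfold PySem.List.pyIdx? at hj
      split_ifs at hj <;> simp_all <;> omega
    have hget : PySem.List.pyGetD t s [] = t[j] := by
      simp [PySem.List.pyGetD, PySem.List.pyGet?, hj, List.getElem?_eq_getElem hjlt]
    have hset : ∀ r : List (Int × Int × Int), PySem.List.pySetD t s r = t.set j r := by
      intro r; simp [PySem.List.pySetD, PySem.List.pySet?, hj]
    rw [hset, hget, List.map_set, PySem.List.length_pySetD]
    rw [← List.getElem_map (f := List.length) (h := by simpa using hjlt)]
    exact List.set_getElem_self (by simpa using hjlt)

theorem pvWriteCell_natCast (t : List (List (Int × Int × Int))) (n : Nat) (i : Int)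
    (v : Int × Int × Int) :
    pvWriteCell t (n : Int) i v = t.set n (PySem.List.pySetD (t.getD n []) i v) := by
  unfold pvWriteCell
  simp

theorem pvFoldWrite_shape (s1 s2 d : Int) (l : List Int) :
    ∀ t : List (List (Int × Int × Int)),
      (l.foldl (fun t sym => pvWriteCell t sym s1 (sym, s2, d)) t).map List.length =
        t.map List.length := by
  induction l with
  | nil => intro t; rfl
  | cons x l ih => intro t; simp only [List.foldl_cons]; rw [ih, pvWriteCell_shape]

theorem pvInnerN_get (s1 s2 d : Int) : ∀ (n : Nat) (t : List (List (Int × Int × Int))) (k : Nat),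
    ((PySem.List.pyRange 0 (n : Int) 1).foldl
        (fun t sym => pvWriteCell t sym s1 (sym, s2, d)) t)[k]? =
      if k < n then (t[k]?).map (fun row => PySem.List.pySetD row s1 ((k : Int), s2, d))
      else t[k]? := by
  intro n
  induction n with
  | zero => intro t k; simp [PySem.List.pyRange_one_eq_nil]
  | succ n ih =>
    intro t k
    have hcast : ((n + 1 : Nat) : Int) = (n : Int) + 1 := by push_cast; ring
    rw [hcast, PySem.List.pyRange_one_succ_right (by positivity), List.foldl_append]
    simp only [List.foldl_cons, List.foldl_nil]
    rw [pvWriteCell_natCast, List.getElem?_set]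
    by_cases hTk : n = k
    · subst hTk
      have hlen : ((PySem.List.pyRange 0 (n : Int) 1).foldl
          (fun t sym => pvWriteCell t sym s1 (sym, s2, d)) t).length = t.length := by
        have := congrArg List.length (pvFoldWrite_shape s1 s2 d (PySem.List.pyRange 0 (n : Int) 1) t)
        simpa using this
      by_cases hT : n < t.length
      · rw [if_pos rfl, if_pos (by omega), if_pos (Nat.lt_succ_self n)]
        have hsome : t[n]? = some t[n] := List.getElem?_eq_getElem hT
        rw [hsome, Option.map_some]
        congr 1
        rw [List.getD_eq_getElem?_getD, ih t n, if_neg (lt_irrefl n), hsome, Option.getD_some]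
      · rw [if_pos rfl, if_neg (by omega), if_pos (Nat.lt_succ_self n)]
        rw [List.getElem?_eq_none (by omega), Option.map_none]
    · rw [if_neg hTk, ih t k]
      by_cases hkn : k < n
      · rw [if_pos hkn, if_pos (by omega)]
      · rw [if_neg hkn, if_neg (by omega)]

theorem pvInner_get (ts s1 s2 d : Int) (t : List (List (Int × Int × Int))) (k : Nat) :
    (pvInner ts s1 s2 d t)[k]? =
      if (k : Int) < ts then (t[k]?).map (fun row => PySem.List.pySetD row s1 ((k : Int), s2, d))
      else t[k]? := by
  unfold pvInner
  by_cases hts : ts ≤ 0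
  · rw [PySem.List.pyRange_one_eq_nil hts, List.foldl_nil, if_neg (by omega)]
  · rw [show ts = ((ts.toNat : Nat) : Int) from (Int.toNat_of_nonneg (by omega)).symm,
      pvInnerN_get]
    by_cases hk : (k : Int) < ((ts.toNat : Nat) : Int)
    · rw [if_pos (by omega), if_pos hk]
    · rw [if_neg (by omega), if_neg hk]

theorem pvInner_shape (ts s1 s2 d : Int) (t : List (List (Int × Int × Int))) :
    (pvInner ts s1 s2 d t).map List.length = t.map List.length :=
  pvFoldWrite_shape s1 s2 d _ t

theorem pvSetD_resolve {α : Type} (row : List α) (i : Int) (v : α)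
    (h1 : -(row.length : Int) ≤ i) (h2 : i < (row.length : Int)) :
    PySem.List.pySetD row i v = row.set (pvResolve i row.length).toNat v := by
  unfold pvResolve
  by_cases h : i < 0
  · rw [if_pos h]
    unfold PySem.List.pySetD PySem.List.pySet? PySem.List.pyIdx?
    split_ifs with h3
    · exfalso; omega
    · simp only [Option.map_some, Option.getD_some]; congr 1; omega
  · rw [if_neg h, PySem.List.pySetD_of_nonneg row v (not_lt.1 h)]

-- commutativity of two enumeration steps, under Pre_ and equal shape
theorem pvResolve_bounds (i : Int) (L : Nat) (h1 : -(L : Int) ≤ i) (h2 : i < (L : Int)) :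
    0 ≤ pvResolve i L ∧ pvResolve i L < (L : Int) := by
  unfold pvResolve
  split_ifs <;> omega

theorem pvMem_enumerate_aux {α : Type} :
    ∀ (l : List α) (st : Int) (j : Nat) (h : j < l.length),
      ((st + (j : Int), l[j]) ∈ PySem.List.enumerate l st) := by
  intro l
  induction l with
  | nil => intro st j h; simp at h
  | cons x l ih =>
    intro st j h
    rw [PySem.List.enumerate_cons]
    rcases j with - | j
    · simp
    · have := ih (st + 1) j (by simpa using h)
      refine List.mem_cons_of_mem _ ?_
      have hcast : st + ((j + 1 : Nat) : Int) = st + 1 + (j : Int) := by push_cast; ring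
      rw [hcast]
      simpa using this

theorem pvPre_elim (t0 : List (List (Int × Int × Int))) (ln ts tl : Int) (bs : List Int) (d : Int)
    (hpre : Pre_add_move t0 ln ts tl bs d) :
    ∀ s ∈ PySem.List.pyRange 0 ts 1, ∀ m ∈ PySem.List.pyRange 0 (pvN bs) 1,
      s < (t0.length : Int) ∧
      (-(((PySem.List.pyGetD t0 s []).length : Int)) ≤ ln + 3 * tl * m ∧
        ln + 3 * tl * m < ((PySem.List.pyGetD t0 s []).length : Int)) ∧
      (ln + 1 < tl →
        ∀ m' ∈ PySem.List.pyRange 0 (pvN bs) 1,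
          pvResolve (ln + 3 * tl * m) (PySem.List.pyGetD t0 s []).length =
            pvResolve (ln + 3 * tl * m') (PySem.List.pyGetD t0 s []).length →
          ln + 3 * tl * m = ln + 3 * tl * m') := by
  intro s hs m hm
  have hs' := (PySem.List.mem_pyRange_one).1 hs
  have hm' := (PySem.List.mem_pyRange_one).1 hm
  rcases hpre with hN | hts | ⟨hle, hrows⟩
  · exact absurd hm' (by omega)
  · exact absurd hs' (by omega)
  · have hslen : s < (t0.length : Int) := by omega
    have hj : s.toNat < t0.length := by omega
    have hcast : s = ((s.toNat : Nat) : Int) := (Int.toNat_of_nonneg hs'.1).symm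
    have hmem : ((0 : Int) + (s.toNat : Int), t0[s.toNat]) ∈ PySem.List.enumerate t0 :=
      pvMem_enumerate_aux t0 0 s.toNat hj
    have hrow := hrows _ hmem (by simpa using by omega)
    have hgd0 : PySem.List.pyGetD t0 s [] = t0[s.toNat] := by
      conv_lhs => rw [hcast]
      rw [PySem.List.pyGetD_natCast]
      exact List.getD_eq_getElem t0 [] hj
    have hgd : (PySem.List.pyGetD t0 s []).length = t0[s.toNat].length := congrArg List.length hgd0
    obtain ⟨⟨ha1, ha2⟩, ⟨hb1, hb2⟩, hcol⟩ := hrow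
    set L : Int := (t0[s.toNat].length : Int) with hLdef
    have hsplit : 3 * tl * (pvN bs - 1) = 3 * tl * m + 3 * tl * (pvN bs - 1 - m) := by ring
    have hbound : -L ≤ ln + 3 * tl * m ∧ ln + 3 * tl * m < L := by
      by_cases hB : 0 ≤ 3 * tl
      · have h1 : 0 ≤ 3 * tl * m := mul_nonneg hB hm'.1
        have h2 : 0 ≤ 3 * tl * (pvN bs - 1 - m) := mul_nonneg hB (by omega)
        omega
      · have h1 : 3 * tl * m ≤ 0 := mul_nonpos_of_nonpos_of_nonneg (by omega) hm'.1
        have h2 : 3 * tl * (pvN bs - 1 - m) ≤ 0 :=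
          mul_nonpos_of_nonpos_of_nonneg (by omega) (by omega)
        omega
    refine ⟨hslen, by rw [hgd]; exact hbound, ?_⟩
    intro hnl m2 hm2 hres
    have hm2' := (PySem.List.mem_pyRange_one).1 hm2
    by_contra hne
    have hsplit2 : 3 * tl * (pvN bs - 1) = 3 * tl * m2 + 3 * tl * (pvN bs - 1 - m2) := by ring
    have hbound2 : -L ≤ ln + 3 * tl * m2 ∧ ln + 3 * tl * m2 < L := by
      by_cases hB : 0 ≤ 3 * tl
      · have h1 : 0 ≤ 3 * tl * m2 := mul_nonneg hB hm2'.1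
        have h2 : 0 ≤ 3 * tl * (pvN bs - 1 - m2) := mul_nonneg hB (by omega)
        omega
      · have h1 : 3 * tl * m2 ≤ 0 := mul_nonpos_of_nonpos_of_nonneg (by omega) hm2'.1
        have h2 : 3 * tl * (pvN bs - 1 - m2) ≤ 0 :=
          mul_nonpos_of_nonpos_of_nonneg (by omega) (by omega)
        omega
    rw [hgd] at hres
    unfold pvResolve at hres
    have hd : 3 * tl * (m2 - m) = 3 * tl * m2 - 3 * tl * m := by ring
    have hd' : 3 * tl * (m - m2) = 3 * tl * m - 3 * tl * m2 := by ring
    have hB0 : 3 * tl ≠ 0 := by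
      intro h0
      apply hne
      have hz : 3 * tl * m = 0 := by rw [h0]; ring
      have hz2 : 3 * tl * m2 = 0 := by rw [h0]; ring
      omega
    apply hcol hnl
    by_cases h1 : ln + 3 * tl * m < 0
    · by_cases h2 : ln + 3 * tl * m2 < 0
      · rw [if_pos h1, if_pos h2] at hres
        exfalso; omega
      · rw [if_pos h1, if_neg h2] at hres
        have hL : L = 3 * tl * (m2 - m) := by omega
        refine ⟨⟨m2 - m, hL⟩, ?_⟩
        have hdiv : L / (3 * tl) = m2 - m := by
          rw [hL, Int.mul_ediv_cancel_left _ hB0]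
        rw [hdiv]
        refine ⟨by omega, by omega, ?_⟩
        by_cases hB : 0 ≤ 3 * tl
        · have h2' : 0 ≤ 3 * tl * m := mul_nonneg hB hm'.1
          omega
        · have h2' : 3 * tl * (pvN bs - 1 - m) ≤ 0 :=
            mul_nonpos_of_nonpos_of_nonneg (by omega) (by omega)
          omega
    · by_cases h2 : ln + 3 * tl * m2 < 0
      · rw [if_neg h1, if_pos h2] at hres
        have hL : L = 3 * tl * (m - m2) := by omega
        refine ⟨⟨m - m2, hL⟩, ?_⟩
        have hdiv : L / (3 * tl) = m - m2 := by
          rw [hL, Int.mul_ediv_cancel_left _ hB0]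
        rw [hdiv]
        refine ⟨by omega, by omega, ?_⟩
        by_cases hB : 0 ≤ 3 * tl
        · have h2' : 0 ≤ 3 * tl * m2 := mul_nonneg hB hm2'.1
          omega
        · have h2' : 3 * tl * (pvN bs - 1 - m2) ≤ 0 :=
            mul_nonpos_of_nonpos_of_nonneg (by omega) (by omega)
          omega
      · rw [if_neg h1, if_neg h2] at hres
        exfalso; omega

theorem pvStep_comm (t0 : List (List (Int × Int × Int))) (ln ts tl : Int) (bs : List Int) (d : Int)
    (hpre : ∀ s ∈ PySem.List.pyRange 0 ts 1, ∀ m ∈ PySem.List.pyRange 0 (pvN bs) 1,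
      s < (t0.length : Int) ∧
      (-(((PySem.List.pyGetD t0 s []).length : Int)) ≤ ln + 3 * tl * m ∧
        ln + 3 * tl * m < ((PySem.List.pyGetD t0 s []).length : Int)) ∧
      (ln + 1 < tl →
        ∀ m' ∈ PySem.List.pyRange 0 (pvN bs) 1,
          pvResolve (ln + 3 * tl * m) (PySem.List.pyGetD t0 s []).length =
            pvResolve (ln + 3 * tl * m') (PySem.List.pyGetD t0 s []).length →
          ln + 3 * tl * m = ln + 3 * tl * m')) (t : List (List (Int × Int × Int))) (m m' : Int)
    (hsh : t.map List.length = t0.map List.length)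
    (hm : m ∈ PySem.List.pyRange 0 (pvN bs) 1) (hm' : m' ∈ PySem.List.pyRange 0 (pvN bs) 1) :
    pvStep ln ts tl d (pvStep ln ts tl d t m) m' = pvStep ln ts tl d (pvStep ln ts tl d t m') m := by
  apply List.ext_getElem?
  intro k
  unfold pvStep
  rw [pvInner_get, pvInner_get, pvInner_get, pvInner_get]
  by_cases hc : (k : Int) < ts
  · simp only [if_pos hc, Option.map_map]
    rcases ht : t[k]? with - | row
    · rfl
    · obtain ⟨hklen, hrow⟩ := List.getElem?_eq_some_iff.1 ht
      simp only [Option.map_some, Function.comp]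
      have hkmem : ((k : Nat) : Int) ∈ PySem.List.pyRange 0 ts 1 :=
        (PySem.List.mem_pyRange_one).mpr ⟨Int.natCast_nonneg k, hc⟩
      obtain ⟨hslt, ⟨hlo, hhi⟩, hinj⟩ := hpre (↑k) hkmem m hm
      obtain ⟨-, ⟨hlo', hhi'⟩, -⟩ := hpre (↑k) hkmem m' hm'
      have hkt0 : k < t0.length := by exact_mod_cast hslt
      have hL : (PySem.List.pyGetD t0 (↑k) []).length = row.length := by
        have hgd : PySem.List.pyGetD t0 (↑k) [] = t0[k] := by
          simp [List.getElem?_eq_getElem hkt0]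
        have h1 : (t.map List.length)[k]? = some t[k].length := by
          simp [hklen]
        rw [hsh] at h1
        simp only [List.getElem?_map, List.getElem?_eq_getElem hkt0, Option.map_some,
          Option.some.injEq] at h1
        rw [hgd, h1, hrow]
      rw [hL] at hlo hhi hlo' hhi' hinj
      rw [pvSetD_resolve row _ _ hlo hhi, pvSetD_resolve row _ _ hlo' hhi',
        pvSetD_resolve _ _ _ (by simpa using hlo') (by simpa using hhi'),
        pvSetD_resolve _ _ _ (by simpa using hlo) (by simpa using hhi)]
      simp only [List.length_set]
      by_cases hres : pvResolve (ln + 3 * tl * m) row.length =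
          pvResolve (ln + 3 * tl * m') row.length
      · by_cases hhalt : ln + 1 ≥ tl
        · simp only [if_pos hhalt]
          rw [hres, List.set_set]
        · have hs1 : ln + 3 * tl * m = ln + 3 * tl * m' :=
            hinj (by omega) m' hm' hres
          rw [hs1]
      · have hb := pvResolve_bounds (ln + 3 * tl * m) row.length hlo hhi
        have hb' := pvResolve_bounds (ln + 3 * tl * m') row.length hlo' hhi'
        rw [List.set_comm _ _ (by omega)]
  · simp only [if_neg hc]

theorem pvStep_shape (ln ts tl d : Int) (t : List (List (Int × Int × Int))) (m : Int) :
    (pvStep ln ts tl d t m).map List.length = t.map List.length := pvInner_shape ..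

-- ===== VERDICT (by name: the statement is the Claim_ definition above) =====
theorem add_move_spec : Claim_equal_add_move := by
  intro t ln ts tl bs d _ hpre
  unfold Spec_add_move
  rw [pvA_eq, pvB_eq]
  have hperm : ((all_v_values bs).map (fun vs => pvEncP (vs.zip bs))).Perm
      (PySem.List.pyRange 0 (pvN bs) 1) := by
    rw [pvN_eq]; exact pvPerm_enc bs
  exact (pvFoldlPermInv (fun z => z.map List.length = t.map List.length) (pvStep ln ts tl d) hperm
    (fun z x hz _ => by
      show (pvStep ln ts tl d z x).map List.length = _
      rw [pvStep_shape, hz])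
    (fun z x y hz hx hy =>
      pvStep_comm t ln ts tl bs d (pvPre_elim t ln ts tl bs d hpre) z x y hz (hperm.mem_iff.mp hx) (hperm.mem_iff.mp hy))
    t rfl)
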